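-- pv_equiv track=rewrite | github.com/pypi-data/pypi-mirror-400 | packages/anatools/anatools-5.1.28-py3-none-any.whl/anatools/annotations/convert_geococo.py | get_highest_classification
-- ===== SOURCE A (Python) =====
-- def get_highest_classification(classifications):
--     # Define the order of classification levels
--     level_rank = {'UNCLASSIFIED': 0, 'CONFIDENTIAL': 1, 'SECRET': 2, 'TOP SECRET': 3}
--
--     # Find the highest classification level in the provided list
--     highest_level = None
--     highest_rank = -1
--
--     for classification in classifications:
--         rank = level_rank.get(classification, -1)
--         if rank > highest_rank:
--             highest_rank = rank
--             highest_level = classification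
--
--     return highest_level
-- ===== SOURCE B (Python) =====
-- def get_highest_classification(classifications):
--     for level in ('TOP SECRET', 'SECRET', 'CONFIDENTIAL', 'UNCLASSIFIED'):
--         if level in classifications:
--             return level
--     return None
-- ===== Notes on version B (the rewrite author's own statement) =====
-- stated objective: simpler
-- what changed: B iterates the fixed priority ranking high-to-low and returns the first level present in the input, instead of scanning the input while tracking a running maximum rank; exact because unknown strings never win in A and equal ranks mean equal strings.
import Mathlib
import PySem

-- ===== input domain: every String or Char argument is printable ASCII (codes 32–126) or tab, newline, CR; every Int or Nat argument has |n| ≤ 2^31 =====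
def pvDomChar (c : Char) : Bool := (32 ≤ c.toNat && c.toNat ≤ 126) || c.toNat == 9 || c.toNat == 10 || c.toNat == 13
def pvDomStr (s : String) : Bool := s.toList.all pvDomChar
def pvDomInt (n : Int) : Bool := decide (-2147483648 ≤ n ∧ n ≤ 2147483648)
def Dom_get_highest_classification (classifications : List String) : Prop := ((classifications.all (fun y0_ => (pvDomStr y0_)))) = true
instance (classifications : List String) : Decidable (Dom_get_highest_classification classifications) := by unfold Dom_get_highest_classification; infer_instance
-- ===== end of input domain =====

-- B iterates the fixed priority ranking high-to-low and returns the first level present,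
-- instead of A's scan of the input tracking a running maximum rank (objective: simpler).

-- ===== PORT A =====
def get_highest_classification (classifications : List String) : Option String :=
  let level_rank : PySem.Dict String Int :=
    PySem.Dict.ofList [("UNCLASSIFIED", 0), ("CONFIDENTIAL", 1), ("SECRET", 2), ("TOP SECRET", 3)]
  let st := classifications.foldl
    (fun (st : Option String × Int) classification =>
      let rank := level_rank.getD classification (-1)
      if rank > st.2 then (some classification, rank) else st)
    (none, -1)
  st.1

-- ===== PORT B =====
-- loop over the priority tuple, return the first level that is `in classifications`
def pvFirstPresent (classifications : List String) : List String → Option String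
  | [] => none
  | l :: t => if classifications.contains l then some l else pvFirstPresent classifications t

def get_highest_classification_alt (classifications : List String) : Option String :=
  pvFirstPresent classifications ["TOP SECRET", "SECRET", "CONFIDENTIAL", "UNCLASSIFIED"]

-- ===== PRECONDITION & SPEC =====
def Spec_get_highest_classification (classifications : List String) (out : Option String) : Prop := out = get_highest_classification_alt classifications
instance (classifications : List String) (out : Option String) : Decidable (Spec_get_highest_classification classifications out) := by unfold Spec_get_highest_classification; infer_instance

-- ===== CLAIM (what is proved, stated in full; the proofs are below) =====
def Claim_equal_get_highest_classification : Prop := ∀ (classifications : List String), Dom_get_highest_classification classifications → Spec_get_highest_classification classifications (get_highest_classification classifications)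

-- ===== LEMMAS AND PROOFS =====

def pvRank (c : String) : Int :=
  (PySem.Dict.ofList [("UNCLASSIFIED", (0:Int)), ("CONFIDENTIAL", 1), ("SECRET", 2), ("TOP SECRET", 3)]).getD c (-1)

lemma pvRank_eq (c : String) : pvRank c =
    if c = "UNCLASSIFIED" then 0 else if c = "CONFIDENTIAL" then 1
    else if c = "SECRET" then 2 else if c = "TOP SECRET" then 3 else -1 := by
  have hitems : (PySem.Dict.ofList [("UNCLASSIFIED", (0:Int)), ("CONFIDENTIAL", 1), ("SECRET", 2), ("TOP SECRET", 3)]).items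
      = [("UNCLASSIFIED", (0:Int)), ("CONFIDENTIAL", 1), ("SECRET", 2), ("TOP SECRET", 3)] := by decide
  simp only [pvRank, PySem.Dict.getD, PySem.Dict.get?, hitems]
  split_ifs with h1 h2 h3 h4
  · subst h1; decide
  · subst h2; decide
  · subst h3; decide
  · subst h4; decide
  · simp [List.find?, beq_eq_false_iff_ne.mpr (Ne.symm h1), beq_eq_false_iff_ne.mpr (Ne.symm h2),
      beq_eq_false_iff_ne.mpr (Ne.symm h3), beq_eq_false_iff_ne.mpr (Ne.symm h4)]

-- the loop body of A, as a structural recursion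
def pvLoop : List String → Option String × Int → Option String × Int
  | [], st => st
  | c :: t, st => if pvRank c > st.2 then pvLoop t (some c, pvRank c) else pvLoop t st

lemma A_eq_loop (xs : List String) : get_highest_classification xs = (pvLoop xs (none, -1)).1 := by
  show (xs.foldl _ ((none : Option String), (-1 : Int))).1 = _
  congr 1
  generalize ((none : Option String), (-1 : Int)) = st
  induction xs generalizing st with
  | nil => rfl
  | cons c t ih => simp only [List.foldl, pvLoop, pvRank]; split <;> exact ih _

def pvInv (st : Option String × Int) : Prop :=
  st = (none, -1) ∨ st = (some "UNCLASSIFIED", 0) ∨ st = (some "CONFIDENTIAL", 1) ∨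
  st = (some "SECRET", 2) ∨ st = (some "TOP SECRET", 3)

lemma pvRank_key (c : String) :
    pvRank c = -1 ∨ (pvRank c = 0 ∧ c = "UNCLASSIFIED") ∨ (pvRank c = 1 ∧ c = "CONFIDENTIAL") ∨
    (pvRank c = 2 ∧ c = "SECRET") ∨ (pvRank c = 3 ∧ c = "TOP SECRET") := by
  rw [pvRank_eq]; split_ifs <;> simp_all

lemma pvRank_inj {a b : String} (ha : 0 ≤ pvRank a) (h : pvRank a = pvRank b) : a = b := by
  rcases pvRank_key a with h1 | ⟨h1, e1⟩ | ⟨h1, e1⟩ | ⟨h1, e1⟩ | ⟨h1, e1⟩ <;>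
    rcases pvRank_key b with h2 | ⟨h2, e2⟩ | ⟨h2, e2⟩ | ⟨h2, e2⟩ | ⟨h2, e2⟩ <;>
    first
    | omega
    | (subst e1; subst e2; rfl)

lemma pvStick (xs : List String) (st : Option String × Int)
    (h : ∀ c ∈ xs, pvRank c ≤ st.2) : pvLoop xs st = st := by
  induction xs with
  | nil => rfl
  | cons c t ih =>
    have hc := h c (by simp)
    rw [pvLoop, if_neg (not_lt.mpr hc)]
    exact ih fun d hd => h d (by simp [hd])

lemma pvMain (xs : List String) (st : Option String × Int) (k : String)
    (hinv : pvInv st) (_hk : 0 ≤ pvRank k) (hmem : k ∈ xs)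
    (hmax : ∀ c ∈ xs, pvRank c ≤ pvRank k)
    (hle : st.2 ≤ pvRank k) (heq : st.2 = pvRank k → st.1 = some k) :
    (pvLoop xs st).1 = some k := by
  induction xs generalizing st with
  | nil => exact absurd hmem (by simp)
  | cons c t ih =>
    have hstlb : (-1 : Int) ≤ st.2 := by
      rcases hinv with h | h | h | h | h <;> simp [h]
    have hct : ∀ d ∈ t, pvRank d ≤ pvRank k := fun d hd => hmax d (by simp [hd])
    by_cases hgt : pvRank c > st.2
    · have hc0 : 0 ≤ pvRank c := by omega
      have hinv' : pvInv (some c, pvRank c) := by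
        have := pvRank_eq c
        unfold pvInv
        split_ifs at this <;> simp_all
      simp only [pvLoop, if_pos hgt]
      by_cases hkt : k ∈ t
      · exact ih (some c, pvRank c) hinv' hkt hct (hmax c (by simp))
          (fun h => by simp [pvRank_inj hc0 h])
      · have hkc : k = c := by
          rcases List.mem_cons.mp hmem with h | h
          · exact h
          · exact absurd h hkt
        subst hkc
        rw [pvStick t (some k, pvRank k) (by simpa using hct)]
    · simp only [pvLoop, if_neg hgt]
      by_cases hkt : k ∈ t
      · exact ih st hinv hkt hct hle heq
      · have hkc : k = c := by
          rcases List.mem_cons.mp hmem with h | h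
          · exact h
          · exact absurd h hkt
        subst hkc
        have hst2 : st.2 = pvRank k := by
          have := hmax k (by simp); omega
        rw [pvStick t st (fun d hd => by have := hct d hd; omega)]
        exact heq hst2

lemma pvRank_le_three (c : String) : pvRank c ≤ 3 := by
  rw [pvRank_eq]; split_ifs <;> omega

-- ===== VERDICT (by name: the statement is the Claim_ definition above) =====
theorem get_highest_classification_spec : Claim_equal_get_highest_classification := by
  intro xs _
  unfold Spec_get_highest_classification
  rw [A_eq_loop]
  simp only [get_highest_classification_alt, pvFirstPresent, List.contains_iff_mem]
  have rTS : pvRank "TOP SECRET" = 3 := by decide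
  have rS : pvRank "SECRET" = 2 := by decide
  have rC : pvRank "CONFIDENTIAL" = 1 := by decide
  have rU : pvRank "UNCLASSIFIED" = 0 := by decide
  by_cases hTS : "TOP SECRET" ∈ xs
  · rw [if_pos (by simpa using hTS)]
    refine pvMain xs _ _ (Or.inl rfl) (by omega) hTS
      (fun c _ => by have := pvRank_le_three c; omega)
      (by show (-1 : Int) ≤ pvRank "TOP SECRET"; omega) ?_
    intro h
    exact absurd (show (-1 : Int) = pvRank "TOP SECRET" from h) (by omega)
  · rw [if_neg (by simpa using hTS)]
    by_cases hS : "SECRET" ∈ xs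
    · rw [if_pos (by simpa using hS)]
      refine pvMain xs _ _ (Or.inl rfl) (by omega) hS ?_
        (by show (-1 : Int) ≤ pvRank "SECRET"; omega)
        (fun h => absurd (show (-1 : Int) = pvRank "SECRET" from h) (by omega))
      intro c hc
      rcases pvRank_key c with h | ⟨h, _⟩ | ⟨h, _⟩ | ⟨h, _⟩ | ⟨h, e3⟩
      · omega
      · omega
      · omega
      · omega
      · exact absurd (e3 ▸ hc) hTS
    · rw [if_neg (by simpa using hS)]
      by_cases hC : "CONFIDENTIAL" ∈ xs
      · rw [if_pos (by simpa using hC)]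
        refine pvMain xs _ _ (Or.inl rfl) (by omega) hC ?_
          (by show (-1 : Int) ≤ pvRank "CONFIDENTIAL"; omega)
          (fun h => absurd (show (-1 : Int) = pvRank "CONFIDENTIAL" from h) (by omega))
        intro c hc
        rcases pvRank_key c with h | ⟨h, _⟩ | ⟨h, _⟩ | ⟨h, e2⟩ | ⟨h, e3⟩
        · omega
        · omega
        · omega
        · exact absurd (e2 ▸ hc) hS
        · exact absurd (e3 ▸ hc) hTS
      · rw [if_neg (by simpa using hC)]
        by_cases hU : "UNCLASSIFIED" ∈ xs
        · rw [if_pos (by simpa using hU)]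
          refine pvMain xs _ _ (Or.inl rfl) (by omega) hU ?_
            (by show (-1 : Int) ≤ pvRank "UNCLASSIFIED"; omega)
            (fun h => absurd (show (-1 : Int) = pvRank "UNCLASSIFIED" from h) (by omega))
          intro c hc
          rcases pvRank_key c with h | ⟨h, _⟩ | ⟨h, e1⟩ | ⟨h, e2⟩ | ⟨h, e3⟩
          · omega
          · omega
          · exact absurd (e1 ▸ hc) hC
          · exact absurd (e2 ▸ hc) hS
          · exact absurd (e3 ▸ hc) hTS
        · rw [if_neg (by simpa using hU)]
          rw [pvStick xs (none, -1) ?_]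
          intro c hc
          rcases pvRank_key c with h | ⟨h, e0⟩ | ⟨h, e1⟩ | ⟨h, e2⟩ | ⟨h, e3⟩
          · show pvRank c ≤ (-1 : Int); omega
          · exact absurd (e0 ▸ hc) hU
          · exact absurd (e1 ▸ hc) hC
          · exact absurd (e2 ▸ hc) hS
          · exact absurd (e3 ▸ hc) hTS
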